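-- pv_equiv track=rewrite | github.com/crown-3/introduction-to-algorithms | assessments/01/wave_sorting.py | WaveSorting
-- ===== SOURCE A (Python) =====
-- def WaveSorting(arr):
--     # we can make a wave pattern with any array that meets the condition
--     # by doing this
--     #
--     # arr.sort()
--     # for i in range(1, len(arr), 2):
--     #     arr[i], arr[i - 1] = arr[i - 1], arr[i]
--     #
--     # (swapping adjacent elements)
--
--     # But the wave pattern is not possible,
--     # if any number occurs more than half the length of the array
--
--     # to examine, I will implement a dictionary counting all the numbers
--     num_count = {}
--     for item in arr:
--         if item not in num_count:
--             num_count[item] = 1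
--         else:
--             num_count[item] += 1
--
--     for each_count in num_count.values():
--         if each_count > len(arr) // 2:
--             return "false"
--
--     return "true"
-- ===== SOURCE B (Python) =====
-- def WaveSorting(arr):
--     # Boyer-Moore majority vote: single pass for a candidate, then one tally pass.
--     candidate = None
--     count = 0
--     for x in arr:
--         if count == 0:
--             candidate = x
--             count = 1
--         elif x == candidate:
--             count += 1
--         else:
--             count -= 1
--     tally = 0
--     for x in arr:
--         if x == candidate:
--             tally += 1
--     return "false" if tally > len(arr) // 2 else "true"
-- ===== Notes on version B (the rewrite author's own statement) =====
-- stated objective: faster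
-- what changed: Replaces A's dictionary of counts scanned for any value above len(arr)//2 by a Boyer-Moore majority vote (candidate/count single pass) followed by one tally pass, using O(1) extra space and no hashing.
import Mathlib
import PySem

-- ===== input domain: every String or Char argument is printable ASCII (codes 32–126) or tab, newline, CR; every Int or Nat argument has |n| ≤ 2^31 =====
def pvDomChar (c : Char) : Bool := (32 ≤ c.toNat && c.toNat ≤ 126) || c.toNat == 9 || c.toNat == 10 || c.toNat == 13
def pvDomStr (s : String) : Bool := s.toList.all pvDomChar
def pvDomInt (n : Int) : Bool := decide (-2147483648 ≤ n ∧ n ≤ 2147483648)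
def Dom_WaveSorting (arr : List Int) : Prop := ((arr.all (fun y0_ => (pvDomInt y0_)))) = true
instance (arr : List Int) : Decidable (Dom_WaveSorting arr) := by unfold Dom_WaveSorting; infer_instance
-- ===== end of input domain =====

-- ===== PORT A =====
-- B replaces A's dict-of-counts with a Boyer-Moore majority vote in O(1) extra space (alternative algorithm, same asymptotic time).
-- early-return loop over the dict's values: "false" on the first count above m, else "true"
def checkCounts (m : Int) : List Int → String
  | [] => "true"
  | c :: rest => if c > m then "false" else checkCounts m rest

def WaveSorting (arr : List Int) : String :=
  let num_count : PySem.Dict Int Int :=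
    arr.foldl (fun d item =>
      if d.contains item = false then d.insert item 1
      else d.insert item (d.getD item 0 + 1)) PySem.Dict.empty
  checkCounts (PySem.Int.floordiv (arr.length : Int) 2) num_count.values

-- ===== PORT B =====
-- one vote step of Boyer-Moore: state = (candidate, count)
def voteStep (s : Option Int × Int) (x : Int) : Option Int × Int :=
  if s.2 = 0 then (some x, 1)
  else if some x = s.1 then (s.1, s.2 + 1)
  else (s.1, s.2 - 1)

def WaveSorting_alt (arr : List Int) : String :=
  let s := arr.foldl voteStep (none, 0)
  let tally := arr.foldl (fun t x => if some x = s.1 then t + 1 else t) (0 : Int)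
  if tally > PySem.Int.floordiv (arr.length : Int) 2 then "false" else "true"

-- ===== PRECONDITION & SPEC =====
def Spec_WaveSorting (arr : List Int) (out : String) : Prop := out = WaveSorting_alt arr
instance (arr : List Int) (out : String) : Decidable (Spec_WaveSorting arr out) := by unfold Spec_WaveSorting; infer_instance

-- ===== CLAIM (what is proved, stated in full; the proofs are below) =====
def Claim_equal_WaveSorting : Prop := ∀ (arr : List Int), Dom_WaveSorting arr → Spec_WaveSorting arr (WaveSorting arr)

-- ===== LEMMAS AND PROOFS =====

-- checkCounts is "false" exactly when some value exceeds m
theorem checkCounts_eq (m : Int) (vs : List Int) :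
    checkCounts m vs = if vs.any (fun v => decide (m < v)) then "false" else "true" := by
  induction vs with
  | nil => rfl
  | cons c rest ih =>
    by_cases h : m < c <;> simp [checkCounts, h, ih]

-- A's counting loop is Counter(arr)
theorem build_eq_counter (arr : List Int) :
    arr.foldl (fun d item =>
      if d.contains item = false then d.insert item 1
      else d.insert item (d.getD item 0 + 1)) PySem.Dict.empty
    = PySem.Dict.counter arr := by
  rw [← PySem.Dict.foldl_insert_getD_add_one_eq_counter]
  apply PySem.List.foldl_congr_mem
  intro d x _
  by_cases h : d.contains x = false
  · simp [h, PySem.Dict.getD_of_not_contains d 0 h]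
  · simp [h]

-- Boyer-Moore invariant: count is nonnegative, the candidate is none only on [],
-- and 2*count_l(x) ≤ |l| + (count if x is the candidate else -count)
theorem vote_inv (l : List Int) :
    0 ≤ (l.foldl voteStep (none, 0)).2 ∧
    ((l.foldl voteStep (none, 0)).1 = none → l = []) ∧
    ∀ x : Int, 2 * (l.count x : Int) ≤ (l.length : Int) +
      (if some x = (l.foldl voteStep (none, 0)).1
       then (l.foldl voteStep (none, 0)).2 else -(l.foldl voteStep (none, 0)).2) := by
  induction l using List.reverseRecOn with
  | nil => simp
  | append_singleton l y ih =>
    obtain ⟨h0, hn, hb⟩ := ih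
    rw [List.foldl_append]
    set s := l.foldl voteStep (none, 0) with hs
    simp only [List.foldl_cons, List.foldl_nil]
    have hlen : ((l ++ [y]).length : Int) = (l.length : Int) + 1 := by simp
    have hcnt : ∀ x : Int, ((l ++ [y]).count x : Int) =
        (l.count x : Int) + (if x = y then 1 else 0) := by
      intro x
      by_cases h : x = y
      · subst h; simp [List.count_append]
      · simp [List.count_append, h, Ne.symm h]
    by_cases hz : s.2 = 0
    · have hstep : voteStep s y = (some y, 1) := by simp [voteStep, hz]
      have h1 : (voteStep s y).1 = some y := by rw [hstep]
      have h2 : (voteStep s y).2 = 1 := by rw [hstep]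
      refine ⟨by rw [h2]; norm_num, by rw [h1]; simp, ?_⟩
      intro x
      have hbx := hb x
      rw [hz] at hbx
      rw [hcnt x, hlen, h1, h2]
      by_cases h : x = y
      · rw [if_pos h, if_pos (by rw [h])]
        split at hbx <;> omega
      · rw [if_neg h, if_neg (by simp [h])]
        split at hbx <;> omega
    · have hcn : s.1 ≠ none := by
        intro h
        apply hz
        have hl := hn h
        rw [hl] at hs
        simp at hs
        rw [hs]
      obtain ⟨c, hc⟩ := Option.ne_none_iff_exists'.mp hcn
      by_cases hy : some y = s.1
      · have hstep : voteStep s y = (s.1, s.2 + 1) := by simp [voteStep, hz, hy]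
        have h1 : (voteStep s y).1 = s.1 := by rw [hstep]
        have h2 : (voteStep s y).2 = s.2 + 1 := by rw [hstep]
        refine ⟨by omega, by rw [h1, hc]; simp, ?_⟩
        intro x
        have hbx := hb x
        rw [hcnt x, hlen, h1, h2]
        by_cases hc2 : some x = s.1
        · have hxy : x = y := by
            rw [← hy] at hc2
            exact Option.some_injective _ hc2
          rw [if_pos hc2] at hbx ⊢
          rw [if_pos hxy]
          omega
        · have hxy : x ≠ y := by
            intro h
            exact hc2 (by rw [h, hy])
          rw [if_neg hc2] at hbx ⊢
          rw [if_neg hxy]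
          omega
      · have hstep : voteStep s y = (s.1, s.2 - 1) := by simp [voteStep, hz, hy]
        have h1 : (voteStep s y).1 = s.1 := by rw [hstep]
        have h2 : (voteStep s y).2 = s.2 - 1 := by rw [hstep]
        refine ⟨by omega, by rw [h1, hc]; simp, ?_⟩
        intro x
        have hbx := hb x
        rw [hcnt x, hlen, h1, h2]
        by_cases hc2 : some x = s.1
        · have hxy : x ≠ y := by
            intro h
            rw [← h] at hy
            exact hy hc2
          rw [if_pos hc2] at hbx ⊢
          rw [if_neg hxy]
          omega
        · rw [if_neg hc2] at hbx ⊢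
          by_cases h : x = y
          · rw [if_pos h]; omega
          · rw [if_neg h]; omega

-- the tally loop counts the candidate's occurrences
theorem tally_eq (arr : List Int) (c : Int) :
    arr.foldl (fun t x => if some x = some c then t + 1 else t) (0 : Int) = (arr.count c : Int) := by
  rw [PySem.List.foldl_ite_add_one (p := fun x : Int => some x = some c) arr 0]
  have h2 : (fun x : Int => decide (some x = some c)) = (fun x : Int => x == c) := by
    funext x; by_cases h : x = c <;> simp [h]
  rw [h2, zero_add, List.count]

-- the two "false" conditions agree
theorem main_eq (arr : List Int) : WaveSorting arr = WaveSorting_alt arr := by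
  have hA : WaveSorting arr =
      if ((PySem.Dict.counter arr).values.any fun v =>
          decide (PySem.Int.floordiv (arr.length : Int) 2 < v)) then "false" else "true" := by
    unfold WaveSorting
    rw [build_eq_counter, checkCounts_eq]
  have hB : WaveSorting_alt arr =
      if PySem.Int.floordiv (arr.length : Int) 2 <
          arr.foldl (fun t x => if some x = (arr.foldl voteStep (none, 0)).1 then t + 1 else t)
            (0 : Int) then "false" else "true" := by
    unfold WaveSorting_alt
    simp only [gt_iff_lt]
  rw [hA, hB]
  set m := PySem.Int.floordiv (arr.length : Int) 2 with hm
  have hm0 : (0 : Int) ≤ m := by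
    rw [hm, PySem.Int.floordiv_eq_ediv_of_pos (by norm_num)]
    positivity
  have hm2 : ∀ c : Int, m < c ↔ (arr.length : Int) < 2 * c := by
    intro c
    rw [hm, PySem.Int.floordiv_eq_ediv_of_pos (by norm_num)]
    omega
  set s := arr.foldl voteStep (none, 0) with hs
  obtain ⟨h0, hn, hb⟩ := vote_inv arr
  rw [← hs] at h0 hn hb
  have key : (((PySem.Dict.counter arr).values.any fun v => decide (m < v)) = true) ↔
      (m < arr.foldl (fun t x => if some x = s.1 then t + 1 else t) (0 : Int)) := by
    constructor
    · intro h
      obtain ⟨v, hv, hmv⟩ := List.any_eq_true.mp h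
      rw [PySem.Dict.values, PySem.Dict.items_counter] at hv
      simp only [List.map_map, List.mem_map] at hv
      obtain ⟨k, hk, rfl⟩ := hv
      have hmk : m < (arr.count k : Int) := by simpa using hmv
      have hcand : some k = s.1 := by
        by_contra hne
        have hbk := hb k
        rw [if_neg hne] at hbk
        have := (hm2 (arr.count k)).mp hmk
        omega
      rw [← hcand, tally_eq]
      exact hmk
    · intro h
      rcases hc : s.1 with _ | c
      · rw [hc] at h
        simp only [reduceCtorEq, if_false, PySem.List.foldl_ignore] at h
        omega
      · rw [hc, tally_eq] at h
        have hcm : c ∈ arr := by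
          by_contra hnm
          rw [List.count_eq_zero_of_not_mem hnm] at h
          simp at h
          omega
        apply List.any_eq_true.mpr
        refine ⟨(arr.count c : Int), ?_, by simpa using h⟩
        rw [PySem.Dict.values, PySem.Dict.items_counter]
        simp only [List.map_map, List.mem_map]
        exact ⟨c, by simpa [PySem.Set.mem_ofList] using hcm, rfl⟩
  exact if_congr key rfl rfl

-- ===== VERDICT (by name: the statement is the Claim_ definition above) =====
theorem WaveSorting_spec : Claim_equal_WaveSorting := by
  intro arr _
  unfold Spec_WaveSorting
  exact main_eq arr
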